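-- pv_equiv track=rewrite | github.com/delorenj/voxxy | .augment/skills/shared/scripts/skf-severity-classify.py | compute_drift_score
-- ===== SOURCE A (Python) =====
-- def compute_drift_score(classified):
--     """Compute overall drift score from classified findings."""
--     severities = {f["severity"] for f in classified}
--
--     if not classified:
--         return "CLEAN"
--     if "CRITICAL" in severities:
--         return "CRITICAL"
--     if "HIGH" in severities or "MEDIUM" in severities:
--         return "SIGNIFICANT"
--     return "MINOR"
-- ===== SOURCE B (Python) =====
-- PRIORITY = {"CRITICAL": 3, "HIGH": 2, "MEDIUM": 2}
-- LABEL = {3: "CRITICAL", 2: "SIGNIFICANT", 1: "MINOR"}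
--
-- def compute_drift_score(classified):
--     """Compute overall drift score from classified findings."""
--     if not classified:
--         return "CLEAN"
--     rank = 1
--     for f in classified:
--         rank = max(rank, PRIORITY.get(f["severity"], 1))
--     return LABEL[rank]
-- ===== Notes on version B (the rewrite author's own statement) =====
-- stated objective: alternative
-- what changed: Replaces the set comprehension plus chained membership tests by a single fold computing the maximum numeric priority of the severities, then maps that rank to its label.
import Mathlib
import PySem

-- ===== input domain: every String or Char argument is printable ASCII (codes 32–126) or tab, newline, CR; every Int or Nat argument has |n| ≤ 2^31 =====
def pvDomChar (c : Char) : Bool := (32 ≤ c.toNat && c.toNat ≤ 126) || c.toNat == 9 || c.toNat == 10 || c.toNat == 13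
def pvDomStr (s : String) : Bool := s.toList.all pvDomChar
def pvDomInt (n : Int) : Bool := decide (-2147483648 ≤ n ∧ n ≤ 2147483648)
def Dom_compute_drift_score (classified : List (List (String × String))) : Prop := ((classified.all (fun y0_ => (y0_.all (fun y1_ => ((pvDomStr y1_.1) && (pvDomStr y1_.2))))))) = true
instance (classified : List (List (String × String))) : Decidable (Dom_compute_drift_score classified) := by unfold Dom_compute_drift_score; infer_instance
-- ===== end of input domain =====

-- B replaces the set comprehension + chained membership tests by a single fold over a
-- numeric priority (max), then maps the resulting rank to its label; same cost.

-- f["severity"]: first-match association-list lookup; Pre_ guarantees the key exists,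
-- the "" default is never reached on admitted inputs (Python raises KeyError there).
def sevOf (f : List (String × String)) : String :=
  ((f.find? (fun p => p.1 == "severity")).map (·.2)).getD ""

-- ===== PORT A =====
def compute_drift_score (classified : List (List (String × String))) : String :=
  let severities : PySem.Set String := PySem.Set.ofList (classified.map (fun f => sevOf f))
  if classified.isEmpty then "CLEAN"
  else if PySem.Set.contains severities "CRITICAL" then "CRITICAL"
  else if PySem.Set.contains severities "HIGH" || PySem.Set.contains severities "MEDIUM" then "SIGNIFICANT"
  else "MINOR"

-- ===== PORT B =====
def prio (s : String) : Int :=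
  if s = "CRITICAL" then 3 else if s = "HIGH" then 2 else if s = "MEDIUM" then 2 else 1

def compute_drift_score_alt (classified : List (List (String × String))) : String :=
  if classified.isEmpty then "CLEAN"
  else
    let rank := classified.foldl (fun r f => max r (prio (sevOf f))) 1
    if rank = 3 then "CRITICAL" else if rank = 2 then "SIGNIFICANT" else "MINOR"

-- ===== PRECONDITION & SPEC =====
-- Pre_: every finding has a "severity" key; on any other input the Python A (and B)
-- raises KeyError.
def Pre_compute_drift_score (classified : List (List (String × String))) : Prop :=
  ∀ f ∈ classified, "severity" ∈ f.map (·.1)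
instance (classified : List (List (String × String))) : Decidable (Pre_compute_drift_score classified) := by unfold Pre_compute_drift_score; infer_instance

def pvWitness_compute_drift_score : (List (List (String × String))) :=
  [[("severity", "HIGH")], [("severity", "LOW"), ("file", "x.py")]]

def Spec_compute_drift_score (classified : List (List (String × String))) (out : String) : Prop := out = compute_drift_score_alt classified
instance (classified : List (List (String × String))) (out : String) : Decidable (Spec_compute_drift_score classified out) := by unfold Spec_compute_drift_score; infer_instance

-- ===== CLAIM (what is proved, stated in full; the proofs are below) =====
def Claim_equal_compute_drift_score : Prop := ∀ (classified : List (List (String × String))), Dom_compute_drift_score classified → Pre_compute_drift_score classified → Spec_compute_drift_score classified (compute_drift_score classified)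

-- ===== LEMMAS AND PROOFS =====

def maxPrio (l : List String) : Int := l.foldl (fun r s => max r (prio s)) 1

theorem prio_ge_one (s : String) : 1 ≤ prio s := by
  unfold prio; split_ifs <;> norm_num

theorem prio_le_three (s : String) : prio s ≤ 3 := by
  unfold prio; split_ifs <;> norm_num

theorem prio_eq_three_iff (s : String) : prio s = 3 ↔ s = "CRITICAL" := by
  unfold prio; split_ifs with h1 h2 h3 <;> simp_all

theorem two_le_prio_iff (s : String) :
    2 ≤ prio s ↔ s = "CRITICAL" ∨ s = "HIGH" ∨ s = "MEDIUM" := by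
  unfold prio; split_ifs with h1 h2 h3 <;> simp_all

theorem foldl_shift (l : List String) (r : Int) (hr : 1 ≤ r) :
    l.foldl (fun a s => max a (prio s)) r = max r (maxPrio l) := by
  induction l generalizing r with
  | nil => simp [maxPrio]; omega
  | cons s l ih =>
    have h1 := prio_ge_one s
    simp only [List.foldl_cons, maxPrio]
    rw [ih (max r (prio s)) (by omega), ih (max 1 (prio s)) (by omega)]
    omega

theorem maxPrio_cons (s : String) (l : List String) :
    maxPrio (s :: l) = max (prio s) (maxPrio l) := by
  have h1 := prio_ge_one s
  have h := foldl_shift l (max 1 (prio s)) (by omega)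
  simp only [maxPrio, List.foldl_cons] at h ⊢
  rw [h]
  omega

theorem maxPrio_ge_one (l : List String) : 1 ≤ maxPrio l := by
  induction l with
  | nil => simp [maxPrio]
  | cons s l ih => rw [maxPrio_cons]; have := prio_ge_one s; omega

theorem maxPrio_le_three (l : List String) : maxPrio l ≤ 3 := by
  induction l with
  | nil => simp [maxPrio]
  | cons s l ih => rw [maxPrio_cons]; have := prio_le_three s; omega

theorem maxPrio_eq_three_iff (l : List String) :
    maxPrio l = 3 ↔ "CRITICAL" ∈ l := by
  induction l with
  | nil => simp [maxPrio]
  | cons s l ih =>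
    rw [maxPrio_cons]
    have h3 := prio_le_three s
    have h3' := maxPrio_le_three l
    constructor
    · intro h
      rcases max_eq_iff.mp h with ⟨h, _⟩ | ⟨h, _⟩
      · simp [(prio_eq_three_iff s).mp h]
      · simp [ih.mp h]
    · intro h
      rcases List.mem_cons.mp h with h | h
      · have : prio s = 3 := (prio_eq_three_iff s).mpr h.symm
        omega
      · have := ih.mpr h; omega

theorem two_le_maxPrio_iff (l : List String) :
    2 ≤ maxPrio l ↔ "CRITICAL" ∈ l ∨ "HIGH" ∈ l ∨ "MEDIUM" ∈ l := by
  induction l with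
  | nil => simp [maxPrio]
  | cons s l ih =>
    rw [maxPrio_cons]
    constructor
    · intro h
      rcases le_max_iff.mp h with h | h
      · rcases (two_le_prio_iff s).mp h with h | h | h <;> simp [h]
      · rcases ih.mp h with h | h | h <;> simp [h]
    · intro h
      rcases h with h | h | h <;> rcases List.mem_cons.mp h with h | h
      · have := (two_le_prio_iff s).mpr (Or.inl h.symm); omega
      · have := ih.mpr (Or.inl h); omega
      · have := (two_le_prio_iff s).mpr (Or.inr (Or.inl h.symm)); omega
      · have := ih.mpr (Or.inr (Or.inl h)); omega
      · have := (two_le_prio_iff s).mpr (Or.inr (Or.inr h.symm)); omega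
      · have := ih.mpr (Or.inr (Or.inr h)); omega

theorem contains_ofList_iff {x : String} {l : List String} :
    PySem.Set.contains (PySem.Set.ofList l) x = true ↔ x ∈ l := by
  rw [PySem.Set.contains_iff, PySem.Set.mem_ofList]

-- ===== VERDICT (by name: the statement is the Claim_ definition above) =====
theorem compute_drift_score_spec : Claim_equal_compute_drift_score := by
  intro classified _ _
  unfold Spec_compute_drift_score compute_drift_score compute_drift_score_alt
  by_cases he : classified.isEmpty
  · simp [he]
  · set sevs := classified.map (fun f => sevOf f) with hsevs
    have hrank : classified.foldl (fun r f => max r (prio (sevOf f))) 1 = maxPrio sevs := by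
      simp only [hsevs, maxPrio, List.foldl_map]
    simp only [he, Bool.false_eq_true, if_false, hrank, Bool.or_eq_true, contains_ofList_iff]
    have h1 := maxPrio_ge_one sevs
    have h3u := maxPrio_le_three sevs
    have hc3 := maxPrio_eq_three_iff sevs
    have hc2 := two_le_maxPrio_iff sevs
    split_ifs <;> first | rfl | (exfalso; tauto) |
      (exfalso; rcases hc2.mp (by omega) with h | h | h <;> tauto) |
      (exfalso; have := hc2.mpr (by tauto); omega)
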